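-- pv_equiv track=rewrite | github.com/chihyangchen/ntu-experiments | sheng-ru/experiment/mobileinsight/algorithm/algorithm_v1.py | check_difference_less_than_off
-- ===== SOURCE A (Python) =====
-- def check_difference_less_than_off(list_a, list_b, off):
--     if not list_a or not list_b:
--         return False
--     for a in list_a:
--         for b in list_b:
--             if abs(a - b) < off:
--                 return True
--     return False
-- ===== SOURCE B (Python) =====
-- def check_difference_less_than_off(list_a, list_b, off):
--     sa = sorted(list_a)
--     sb = sorted(list_b)
--     i = j = 0
--     while i < len(sa) and j < len(sb):
--         if abs(sa[i] - sb[j]) < off: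
--             return True
--         if sa[i] < sb[j]:
--             i += 1
--         else:
--             j += 1
--     return False
-- ===== Notes on version B (the rewrite author's own statement) =====
-- stated objective: alternative
-- what changed: Replaced the nested all-pairs scan with sorting both lists and a two-pointer merge walk that stops as soon as some cross pair differs by less than off; asymptotically O((n+m) log) worst-case but not measurably faster on the random timing inputs, where A's early exit wins.
import Mathlib
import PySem

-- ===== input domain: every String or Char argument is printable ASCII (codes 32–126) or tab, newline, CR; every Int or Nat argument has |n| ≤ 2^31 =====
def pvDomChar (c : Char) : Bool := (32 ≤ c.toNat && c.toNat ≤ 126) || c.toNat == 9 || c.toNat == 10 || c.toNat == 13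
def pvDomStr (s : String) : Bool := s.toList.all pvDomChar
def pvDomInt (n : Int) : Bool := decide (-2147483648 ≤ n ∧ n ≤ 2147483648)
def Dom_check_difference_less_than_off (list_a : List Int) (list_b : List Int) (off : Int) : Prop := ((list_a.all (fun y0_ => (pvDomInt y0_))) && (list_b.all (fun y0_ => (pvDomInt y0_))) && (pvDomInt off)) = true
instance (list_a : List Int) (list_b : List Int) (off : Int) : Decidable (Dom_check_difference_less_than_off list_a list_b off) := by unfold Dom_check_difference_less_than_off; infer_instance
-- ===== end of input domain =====

-- B replaces A's nested all-pairs scan by sorting both lists and a two-pointer merge walk (objective: alternative algorithm).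

-- ===== PORT A =====
-- literal port of A: empty guard, then nested loops with early return True
def check_difference_less_than_off (list_a : List Int) (list_b : List Int) (off : Int) : Bool :=
  if list_a.isEmpty || list_b.isEmpty then false
  else list_a.any (fun a => list_b.any (fun b => decide (|a - b| < off)))

-- ===== PORT B =====
-- the while-loop of Source B over indices i, j, written as recursion on the two sorted lists
def tpLoop (off : Int) : List Int → List Int → Bool
  | a :: as_, b :: bs =>
    if |a - b| < off then true
    else if a < b then tpLoop off as_ (b :: bs)
    else tpLoop off (a :: as_) bs
  | _, _ => false
  termination_by xs ys => xs.length + ys.length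
  decreasing_by all_goals simp

def check_difference_less_than_off_alt (list_a : List Int) (list_b : List Int) (off : Int) : Bool :=
  tpLoop off (PySem.List.sorted list_a (fun x => x) false) (PySem.List.sorted list_b (fun x => x) false)

-- ===== PRECONDITION & SPEC =====
def Spec_check_difference_less_than_off (list_a : List Int) (list_b : List Int) (off : Int) (out : Bool) : Prop := out = check_difference_less_than_off_alt list_a list_b off
instance (list_a : List Int) (list_b : List Int) (off : Int) (out : Bool) : Decidable (Spec_check_difference_less_than_off list_a list_b off out) := by unfold Spec_check_difference_less_than_off; infer_instance

-- ===== CLAIM (what is proved, stated in full; the proofs are below) =====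
def Claim_equal_check_difference_less_than_off : Prop := ∀ (list_a : List Int) (list_b : List Int) (off : Int), Dom_check_difference_less_than_off list_a list_b off → Spec_check_difference_less_than_off list_a list_b off (check_difference_less_than_off list_a list_b off)

-- ===== LEMMAS AND PROOFS =====

-- if the two-pointer walk reports True, a close pair exists
theorem tpLoop_true {off : Int} {xs ys : List Int} (h : tpLoop off xs ys = true) :
    ∃ x ∈ xs, ∃ y ∈ ys, |x - y| < off := by
  fun_induction tpLoop off xs ys with
  | case1 a as_ b bs hlt => exact ⟨a, by simp, b, by simp, hlt⟩
  | case2 a as_ b bs hlt hab ih =>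
      obtain ⟨x, hx, y, hy, hxy⟩ := ih h
      exact ⟨x, by simp [hx], y, hy, hxy⟩
  | case3 a as_ b bs hlt hab ih =>
      obtain ⟨x, hx, y, hy, hxy⟩ := ih h
      exact ⟨x, hx, y, by simp [hy], hxy⟩
  | case4 xs ys h' => simp at h

-- on sorted inputs, a False verdict means no close pair exists
theorem tpLoop_false {off : Int} {xs ys : List Int}
    (hx : xs.Pairwise (· ≤ ·)) (hy : ys.Pairwise (· ≤ ·))
    (h : tpLoop off xs ys = false) :
    ∀ x ∈ xs, ∀ y ∈ ys, off ≤ |x - y| := by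
  fun_induction tpLoop off xs ys with
  | case1 a as_ b bs hlt => simp at h
  | case2 a as_ b bs hlt hab ih =>
      intro x hxm y hym
      rcases List.mem_cons.mp hxm with rfl | hxm
      · -- x = a, and every y ∈ b :: bs satisfies b ≤ y, with b - a ≥ off
        have hby : b ≤ y := by
          rcases List.mem_cons.mp hym with rfl | hym'
          · exact le_refl _
          · exact (List.pairwise_cons.mp hy).1 y hym'
        have : off ≤ b - x := by
          have : |x - b| = b - x := by
            rw [abs_of_nonpos (by omega)]; omega
          omega
        rw [abs_of_nonpos (by omega)]; omega
      · exact ih (List.pairwise_cons.mp hx).2 hy h x hxm y hym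
  | case3 a as_ b bs hlt hab ih =>
      intro x hxm y hym
      rcases List.mem_cons.mp hym with rfl | hym
      · -- y = b ≤ a ≤ every x ∈ a :: as_, with a - b ≥ off
        have hax : y ≤ a := by omega
        have hxa : a ≤ x := by
          rcases List.mem_cons.mp hxm with rfl | hxm'
          · exact le_refl _
          · exact (List.pairwise_cons.mp hx).1 x hxm'
        have : off ≤ a - y := by
          have : |a - y| = a - y := by
            rw [abs_of_nonneg (by omega)]
          omega
        rw [abs_of_nonneg (by omega)]; omega
      · exact ih hx (List.pairwise_cons.mp hy).2 h x hxm y hym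
  | case4 xs ys h' =>
      intro x hxm y hym
      rcases xs with _ | ⟨a, as_⟩
      · simp at hxm
      · rcases ys with _ | ⟨b, bs⟩
        · simp at hym
        · exact (h' a as_ b bs rfl rfl).elim

theorem alt_true_iff (list_a list_b : List Int) (off : Int) :
    check_difference_less_than_off_alt list_a list_b off = true ↔
      ∃ x ∈ list_a, ∃ y ∈ list_b, |x - y| < off := by
  unfold check_difference_less_than_off_alt
  constructor
  · intro h
    obtain ⟨x, hx, y, hy, hxy⟩ := tpLoop_true h
    exact ⟨x, (PySem.List.mem_sorted _ _ _ _).mp hx, y, (PySem.List.mem_sorted _ _ _ _).mp hy, hxy⟩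
  · intro ⟨x, hx, y, hy, hxy⟩
    by_contra hne
    have hf : tpLoop off (PySem.List.sorted list_a (fun x => x) false)
        (PySem.List.sorted list_b (fun x => x) false) = false := by
      cases hcases : tpLoop off (PySem.List.sorted list_a (fun x => x) false)
          (PySem.List.sorted list_b (fun x => x) false)
      · rfl
      · exact absurd hcases hne
    have := tpLoop_false (PySem.List.sorted_pairwise list_a (fun x => x)) (PySem.List.sorted_pairwise list_b (fun x => x)) hf
      x ((PySem.List.mem_sorted _ _ _ _).mpr hx) y ((PySem.List.mem_sorted _ _ _ _).mpr hy)
    omega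

theorem a_true_iff (list_a list_b : List Int) (off : Int) :
    check_difference_less_than_off list_a list_b off = true ↔
      ∃ x ∈ list_a, ∃ y ∈ list_b, |x - y| < off := by
  unfold check_difference_less_than_off
  split
  · rename_i hemp
    simp only [Bool.or_eq_true, List.isEmpty_iff] at hemp
    constructor
    · intro h; simp at h
    · intro ⟨x, hx, y, hy, _⟩
      rcases hemp with rfl | rfl
      · simp at hx
      · simp at hy
  · simp [List.any_eq_true]

-- ===== VERDICT (by name: the statement is the Claim_ definition above) =====
theorem check_difference_less_than_off_spec : Claim_equal_check_difference_less_than_off := by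
  intro list_a list_b off _
  unfold Spec_check_difference_less_than_off
  rw [Bool.eq_iff_iff, a_true_iff, alt_true_iff]
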